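-- pv_equiv track=rewrite | github.com/Kodsport/swedish-olympiad-2022-public | onlinekval/ljusshow/submissions/accepted/js_dedup.py | compute
-- ===== SOURCE A (Python) =====
-- def compute(R, L, hasR, hasG, hasB):
--     whiteSquares = 0
--     for i in range(len(R)):
--         r = hasR or R[i] == 'R' or L[i] == 'R'
--         g = hasG or R[i] == 'G' or L[i] == 'G'
--         b = hasB or R[i] == 'B' or L[i] == 'B'
--
--         if r and g and b:
--             whiteSquares += 1
--     return whiteSquares
-- ===== SOURCE B (Python) =====
-- def compute(R, L, hasR, hasG, hasB):
--     n = len(R)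
--     ok = set(range(n))
--     for c, has in (('R', hasR), ('G', hasG), ('B', hasB)):
--         if not has:
--             ok &= {i for i in range(n) if R[i] == c or L[i] == c}
--     return len(ok)
-- ===== Notes on version B (the rewrite author's own statement) =====
-- stated objective: alternative
-- what changed: B works by staged set intersection: for each color not supplied by a flag it builds the set of positions where that color is present, intersects these index sets, and returns the cardinality, instead of A's single pass with a per-position triple boolean test and a counter.
import Mathlib
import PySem

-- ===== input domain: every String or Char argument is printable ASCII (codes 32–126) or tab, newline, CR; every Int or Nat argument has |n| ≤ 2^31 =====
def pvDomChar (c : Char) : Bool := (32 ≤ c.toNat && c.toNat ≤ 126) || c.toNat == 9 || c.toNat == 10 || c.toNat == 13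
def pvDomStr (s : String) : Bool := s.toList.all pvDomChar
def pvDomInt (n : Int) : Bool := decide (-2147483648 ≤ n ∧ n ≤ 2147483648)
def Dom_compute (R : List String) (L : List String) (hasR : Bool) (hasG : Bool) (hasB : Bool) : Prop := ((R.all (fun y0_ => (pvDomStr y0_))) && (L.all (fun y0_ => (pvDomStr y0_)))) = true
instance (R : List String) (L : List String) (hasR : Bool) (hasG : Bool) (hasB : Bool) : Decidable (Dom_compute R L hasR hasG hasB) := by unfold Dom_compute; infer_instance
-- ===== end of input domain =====

-- B replaces A's single counting pass by staged set intersection: one index set per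
-- flag-missing color, intersected, returning the cardinality (alternative decomposition).

-- ===== PORT A =====
-- L[i] is read with getD ""; within Pre_compute every L access Python performs is in
-- range (out-of-range positions are short-circuited), so this is exact on Pre_.
def compute (R : List String) (L : List String) (hasR : Bool) (hasG : Bool) (hasB : Bool) : Int :=
  (List.range R.length).foldl (fun whiteSquares i =>
    let r := hasR || R.getD i "" == "R" || L.getD i "" == "R"
    let g := hasG || R.getD i "" == "G" || L.getD i "" == "G"
    let b := hasB || R.getD i "" == "B" || L.getD i "" == "B"
    if r && g && b then whiteSquares + 1 else whiteSquares) 0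

-- ===== PORT B =====
-- set(range(n)) is already a distinct list; the Python set intersection 'ok &= {i in
-- range(n) | …}' is ported as filtering ok by the comprehension's condition (equal as a
-- finite set, hence in cardinality, which is all that is returned). L read as in port A.
def compute_alt (R : List String) (L : List String) (hasR : Bool) (hasG : Bool) (hasB : Bool) : Int :=
  let n := R.length
  let ok := List.range n
  let ok := [("R", hasR), ("G", hasG), ("B", hasB)].foldl
    (fun ok (p : String × Bool) =>
      if !p.2 then ok.filter (fun i => R.getD i "" == p.1 || L.getD i "" == p.1) else ok) ok
  (ok.length : Int)

-- ===== PRECONDITION & SPEC =====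
-- Pre_ is exactly where Python A returns: it raises IndexError iff some position i of R
-- beyond L's length needs a color not present in R[i] (then L[i] is read); B raises on
-- exactly the same inputs.
def Pre_compute (R : List String) (L : List String) (hasR : Bool) (hasG : Bool) (hasB : Bool) : Prop :=
  ∀ i, i < R.length → L.length ≤ i →
    ((hasR || R.getD i "" == "R") && (hasG || R.getD i "" == "G") && (hasB || R.getD i "" == "B")) = true
instance (R : List String) (L : List String) (hasR : Bool) (hasG : Bool) (hasB : Bool) : Decidable (Pre_compute R L hasR hasG hasB) := by unfold Pre_compute; infer_instance

def pvWitness_compute : List String × List String × Bool × Bool × Bool :=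
  (["R", "x"], ["G", "B"], false, true, false)

def Spec_compute (R : List String) (L : List String) (hasR : Bool) (hasG : Bool) (hasB : Bool) (out : Int) : Prop := out = compute_alt R L hasR hasG hasB
instance (R : List String) (L : List String) (hasR : Bool) (hasG : Bool) (hasB : Bool) (out : Int) : Decidable (Spec_compute R L hasR hasG hasB out) := by unfold Spec_compute; infer_instance

-- ===== CLAIM (what is proved, stated in full; the proofs are below) =====
def Claim_equal_compute : Prop := ∀ (R : List String) (L : List String) (hasR : Bool) (hasG : Bool) (hasB : Bool), Dom_compute R L hasR hasG hasB → Pre_compute R L hasR hasG hasB → Spec_compute R L hasR hasG hasB (compute R L hasR hasG hasB)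


-- ===== LEMMAS AND PROOFS =====

-- the counting fold over range n equals the length of the filtered range
theorem foldl_count_eq_filter_length (p : Nat → Bool) :
    ∀ (n : Nat) (a : Int),
      (List.range n).foldl (fun acc i => if p i then acc + 1 else acc) a
        = a + ((List.range n).filter p).length := by
  intro n
  induction n with
  | zero => intro a; simp
  | succ n ih =>
    intro a
    by_cases h : p n <;>
      simp [List.range_succ, List.foldl_append, List.filter_append, ih, h] <;> omega

theorem foldl_add_one : ∀ (n : Nat) (a : Int),
    (List.range n).foldl (fun acc _ => acc + 1) a = a + n := by
  intro n
  induction n with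
  | zero => intro a; simp
  | succ n ih => intro a; simp [List.range_succ, List.foldl_append, ih]; omega

theorem filter_congr' (p q : Nat → Bool) (h : ∀ i, p i = q i) (l : List Nat) :
    l.filter p = l.filter q := by
  induction l with
  | nil => rfl
  | cons x xs ih => simp [List.filter, h x, ih]

-- ===== VERDICT (by name: the statement is the Claim_ definition above) =====
theorem compute_spec : Claim_equal_compute := by
  intro R L hasR hasG hasB _ _
  unfold Spec_compute compute compute_alt
  cases hasR <;> cases hasG <;> cases hasB <;>
    simp only [List.foldl_cons, List.foldl_nil, Bool.not_false, Bool.not_true, reduceIte,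
      Bool.false_eq_true, Bool.true_eq_false, if_false, if_true,
      Bool.false_or, Bool.true_or, Bool.true_and, Bool.and_true, Bool.and_self,
      List.filter_filter]
  case true.true.true =>
    rw [foldl_add_one]; simp
  all_goals rw [foldl_count_eq_filter_length, zero_add]
  all_goals refine congrArg _ (congrArg _ (filter_congr' _ _ (fun i => ?_) _))
  all_goals cases hr : (R.getD i "" == "R" || L.getD i "" == "R") <;>
    cases hg : (R.getD i "" == "G" || L.getD i "" == "G") <;>
    cases hb : (R.getD i "" == "B" || L.getD i "" == "B") <;>
      simp [hr, hg, hb]
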